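-- pv_equiv track=rewrite | github.com/LeeHeonWoo1/CodingTest | Programmers/Lv_1/n_numbers.py | solution
-- ===== SOURCE A (Python) =====
-- def solution(x, n):
--     if x < 0:
--         return [i for i in range(x*n, x+1, -x)][::-1]
--     elif x == 0:
--         answer = []
--         for i in range(n):
--             answer.append(0)
--         return answer
--     else:
--         return [i for i in range(x, x*n+1, x)]
-- ===== SOURCE B (Python) =====
-- def solution(x, n):
--     return [x * i for i in range(1, n + 1)]
-- ===== Notes on version B (the rewrite author's own statement) =====
-- stated objective: simpler
-- what changed: Replaced A's three-way sign branching (a reversed negative-stepped range, an explicit zero-append loop, and a positive stepped range) by one uniform index-based comprehension x*i for i in 1..n.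
import Mathlib
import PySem

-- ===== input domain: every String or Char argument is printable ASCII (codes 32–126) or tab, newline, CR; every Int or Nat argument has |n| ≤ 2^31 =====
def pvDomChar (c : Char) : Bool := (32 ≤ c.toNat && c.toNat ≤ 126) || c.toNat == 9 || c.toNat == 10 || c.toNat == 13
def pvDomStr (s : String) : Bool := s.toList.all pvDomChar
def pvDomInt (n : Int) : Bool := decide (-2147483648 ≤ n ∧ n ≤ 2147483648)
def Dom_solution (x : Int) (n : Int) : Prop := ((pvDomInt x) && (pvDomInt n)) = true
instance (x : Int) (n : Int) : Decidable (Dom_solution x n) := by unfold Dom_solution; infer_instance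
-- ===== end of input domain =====

-- ===== PORT A =====
-- B collapses A's sign-dependent stepped ranges into one index-based comprehension (simpler).
def solution (x : Int) (n : Int) : List Int :=
  if x < 0 then
    -- [i for i in range(x*n, x+1, -x)][::-1]
    (PySem.List.slice? (PySem.List.pyRange (x*n) (x+1) (-x)) none none (-1)).getD []
  else if x = 0 then
    -- answer = []; for i in range(n): answer.append(0)
    (PySem.List.pyRange 0 n 1).foldl (fun acc _ => acc ++ [(0 : Int)]) []
  else
    -- [i for i in range(x, x*n+1, x)]
    PySem.List.pyRange x (x*n+1) x

-- ===== PORT B =====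
-- [x * i for i in range(1, n + 1)]
def solution_alt (x : Int) (n : Int) : List Int :=
  (PySem.List.pyRange 1 (n+1) 1).map (fun i => x * i)

-- ===== PRECONDITION & SPEC =====
def Spec_solution (x : Int) (n : Int) (out : List Int) : Prop := out = solution_alt x n
instance (x : Int) (n : Int) (out : List Int) : Decidable (Spec_solution x n out) := by unfold Spec_solution; infer_instance

-- ===== CLAIM (what is proved, stated in full; the proofs are below) =====
def Claim_equal_solution : Prop := ∀ (x : Int) (n : Int), Dom_solution x n → Spec_solution x n (solution x n)

-- ===== LEMMAS AND PROOFS =====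

-- ===== VERDICT (by name: the statement is the Claim_ definition above) =====
-- B in closed form over List.range
theorem alt_eq (x n : Int) :
    solution_alt x n = (List.range n.toNat).map (fun k : Nat => x * (1 + (k : Int))) := by
  unfold solution_alt
  rw [PySem.List.pyRange_one, List.map_map]
  have h : n + 1 - 1 = n := by ring
  rw [h]
  rfl

-- reversing a map over List.range is the map of the index-flipped function
theorem rev_map_range (f g : Nat → Int) (m : Nat)
    (h : ∀ j, j < m → f (m - 1 - j) = g j) :
    ((List.range m).map f).reverse = (List.range m).map g := by
  apply List.ext_getElem
  · simp
  · intro j h1 h2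
    simp only [List.length_reverse, List.length_map, List.length_range] at h1 h2
    simp only [List.getElem_reverse, List.getElem_map, List.getElem_range,
      List.length_map, List.length_range]
    exact h j h2

theorem range_count_pos {x n : Int} (hx : 0 < x) :
    (if x < x*n+1 then ((x*n+1 - x + x - 1) / x).toNat else 0) = n.toNat := by
  by_cases hn : n ≤ 0
  · have h1 : ¬ x < x*n+1 := by nlinarith
    simp [h1, Int.toNat_of_nonpos hn]
  · push Not at hn
    have h1 : x < x*n+1 := by nlinarith
    have h2 : (x*n+1 - x + x - 1) = x*n := by ring
    rw [if_pos h1, h2, Int.mul_ediv_cancel_left _ (by omega : x ≠ 0)]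

theorem range_count_neg {x n : Int} (hx : x < 0) :
    (if x*n < x+1 then ((x+1 - x*n + -x - 1) / -x).toNat else 0) = n.toNat := by
  by_cases hn : n ≤ 0
  · have h1 : ¬ x*n < x+1 := by nlinarith
    simp [h1, Int.toNat_of_nonpos hn]
  · push Not at hn
    have h1 : x*n < x+1 := by nlinarith
    have h2 : (x+1 - x*n + -x - 1) = -x*n := by ring
    rw [if_pos h1, h2, Int.mul_ediv_cancel_left _ (by omega : -x ≠ 0)]

-- ===== VERDICT (by name: the statement is the Claim_ definition above) =====
theorem solution_spec : Claim_equal_solution := by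
  unfold Claim_equal_solution Spec_solution
  intro x n _
  rcases lt_trichotomy x 0 with hx | hx | hx
  · -- negative x: reversed stepped range
    rw [alt_eq]
    simp only [solution, if_pos hx, PySem.List.slice?_none_none_neg_one, Option.getD_some]
    rw [PySem.List.pyRange_of_pos _ _ (by omega : (0:Int) < -x), range_count_neg hx]
    apply rev_map_range
    intro j hj
    have h1 : ((n.toNat - 1 - j : Nat) : Int) = n - 1 - j := by omega
    rw [h1]
    ring
  · -- x = 0: append loop
    subst hx
    rw [alt_eq]
    simp only [solution, lt_irrefl]
    rw [PySem.List.foldl_append_singleton_eq_map (f := fun _ => (0:Int))]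
    simp [PySem.List.pyRange_zero, List.map_map, Function.comp_def, List.map_const']
  · -- positive x: stepped range
    rw [alt_eq]
    simp only [solution, if_neg (by omega : ¬ x < 0), if_neg (by omega : ¬ x = 0)]
    rw [PySem.List.pyRange_of_pos _ _ hx, range_count_pos hx]
    apply List.map_congr_left
    intro k _
    ring
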